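-- pv_equiv track=rewrite | github.com/ESA-VirES/VirES-Server | vires/vires/processes/retrieve_continuous_segments.py | _generate_time_intervals
-- ===== SOURCE A (Python) =====
-- def _generate_time_intervals(times, breaks):
--     time_start = times[0]
--     for idx in breaks:
--         time_end = times[idx]
--         yield time_start, time_end
--         time_start = times[idx + 1]
--     time_end = times[-1]
--     yield time_start, time_end
-- ===== SOURCE B (Python) =====
-- def _generate_time_intervals(times, breaks):
--     out = []
--     end = times[-1]
--     for b in reversed(breaks):
--         out.append((times[b + 1], end))
--         end = times[b]
--     out.append((times[0], end))
--     yield from reversed(out)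
-- ===== Notes on version B (the rewrite author's own statement) =====
-- stated objective: alternative
-- what changed: B walks breaks in REVERSE order carrying the running interval END (A walks forward carrying the running START), builds the interval list back-to-front, and finally yields its reversal.
import Mathlib
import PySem

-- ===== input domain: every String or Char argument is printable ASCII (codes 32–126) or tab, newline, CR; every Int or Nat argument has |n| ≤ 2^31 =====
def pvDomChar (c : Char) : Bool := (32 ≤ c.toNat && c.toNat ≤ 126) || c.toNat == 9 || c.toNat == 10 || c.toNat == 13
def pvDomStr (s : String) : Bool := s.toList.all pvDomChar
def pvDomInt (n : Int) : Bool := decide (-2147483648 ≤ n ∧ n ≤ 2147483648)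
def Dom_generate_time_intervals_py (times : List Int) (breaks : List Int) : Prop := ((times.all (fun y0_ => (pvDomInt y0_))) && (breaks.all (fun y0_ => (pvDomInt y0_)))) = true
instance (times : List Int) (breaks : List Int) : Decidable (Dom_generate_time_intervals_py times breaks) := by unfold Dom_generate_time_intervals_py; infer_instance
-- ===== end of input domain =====

-- B walks breaks in reverse carrying the running interval END and builds the output back-to-front,
-- then reverses it (alternative traversal; return-value equivalence of the yielded sequences on Pre_).

-- ===== PORT A =====
-- forward for-loop over breaks threading time_start; a failing index lookup ends the generator mid-yield (excluded by Pre_)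
def genA_loop (times : List Int) (breaks : List Int) (time_start : Int) (acc : List (Int × Int)) : List (Int × Int) :=
  match breaks with
  | [] =>
    match PySem.List.pyGet? times (-1) with
    | some time_end => acc ++ [(time_start, time_end)]
    | none => acc
  | idx :: rest =>
    match PySem.List.pyGet? times idx with
    | none => acc
    | some time_end =>
      match PySem.List.pyGet? times (idx + 1) with
      | none => acc ++ [(time_start, time_end)]
      | some ts' => genA_loop times rest ts' (acc ++ [(time_start, time_end)])

def generate_time_intervals_py (times : List Int) (breaks : List Int) : List (Int × Int) :=
  match PySem.List.pyGet? times 0 with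
  | none => []
  | some time_start => genA_loop times breaks time_start []

-- ===== PORT B =====
-- reversed(breaks) loop: append (times[b+1], end) then end := times[b]; finally append (times[0], end)
-- and yield reversed(out); a failing lookup aborts before anything is yielded (excluded by Pre_)
def genB_loop (times : List Int) (rb : List Int) (endv : Int) (out : List (Int × Int)) : List (Int × Int) :=
  match rb with
  | [] =>
    match PySem.List.pyGet? times 0 with
    | some s => out ++ [(s, endv)]
    | none => []
  | b :: rest =>
    match PySem.List.pyGet? times (b + 1), PySem.List.pyGet? times b with
    | some s, some e' => genB_loop times rest e' (out ++ [(s, endv)])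
    | _, _ => []

def generate_time_intervals_py_alt (times : List Int) (breaks : List Int) : List (Int × Int) :=
  match PySem.List.pyGet? times (-1) with
  | none => []
  | some endv => (genB_loop times breaks.reverse endv []).reverse

-- ===== PRECONDITION & SPEC =====
-- Pre_ excludes exactly the inputs where A raises IndexError: empty times, or a break index b
-- with b or b+1 outside Python's index range for times.
def Pre_generate_time_intervals_py (times : List Int) (breaks : List Int) : Prop :=
  times ≠ [] ∧ ∀ b ∈ breaks, PySem.Raise.InRange times.length b ∧ PySem.Raise.InRange times.length (b + 1)
instance (times : List Int) (breaks : List Int) : Decidable (Pre_generate_time_intervals_py times breaks) := by unfold Pre_generate_time_intervals_py; infer_instance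
def pvWitness_generate_time_intervals_py : List Int × List Int := ([10, 20, 30, 40], [1, 2])

def Spec_generate_time_intervals_py (times : List Int) (breaks : List Int) (out : List (Int × Int)) : Prop := out = generate_time_intervals_py_alt times breaks
instance (times : List Int) (breaks : List Int) (out : List (Int × Int)) : Decidable (Spec_generate_time_intervals_py times breaks out) := by unfold Spec_generate_time_intervals_py; infer_instance

-- ===== CLAIM (what is proved, stated in full; the proofs are below) =====
def Claim_equal_generate_time_intervals_py : Prop := ∀ (times : List Int) (breaks : List Int), Dom_generate_time_intervals_py times breaks → Pre_generate_time_intervals_py times breaks → Spec_generate_time_intervals_py times breaks (generate_time_intervals_py times breaks)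

-- ===== LEMMAS AND PROOFS =====

-- common reference form: intervals (times[s], times[e]) for zipped boundary indices, final end index -1
def pvZip (times : List Int) (breaks : List Int) (eidx : Int) : List (Int × Int) :=
  ((0 :: breaks.map (· + 1)).zip (breaks ++ [eidx])).map
    (fun p => (PySem.List.pyGetD times p.1 0, PySem.List.pyGetD times p.2 0))

theorem pyGet?_isSome_of_inRange (xs : List Int) (i : Int) (h : PySem.Raise.InRange xs.length i) :
    ∃ v, PySem.List.pyGet? xs i = some v := by
  cases hg : PySem.List.pyGet? xs i with
  | none => exact absurd ((PySem.List.pyGet?_eq_none_iff xs i).mp hg) (not_not_intro h)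
  | some v => exact ⟨v, rfl⟩

theorem pyGetD_eq (xs : List Int) (i v : Int) (h : PySem.List.pyGet? xs i = some v) :
    PySem.List.pyGetD xs i 0 = v := by
  simp [PySem.List.pyGetD, h]

theorem genA_eq_zip (times : List Int) (breaks : List Int) :
    ∀ (s0 ts : Int) (acc : List (Int × Int)),
    times ≠ [] →
    (∀ b ∈ breaks, PySem.Raise.InRange times.length b ∧ PySem.Raise.InRange times.length (b + 1)) →
    PySem.List.pyGet? times s0 = some ts →
    genA_loop times breaks ts acc = acc ++
      (((s0 :: breaks.map (· + 1)).zip (breaks ++ [(-1 : Int)])).map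
        (fun p => (PySem.List.pyGetD times p.1 0, PySem.List.pyGetD times p.2 0))) := by
  induction breaks with
  | nil =>
    intro s0 ts acc hne _ hs0
    obtain ⟨te, hte⟩ := pyGet?_isSome_of_inRange times (-1) (by
      have hpos : 0 < times.length := List.length_pos_iff.mpr hne
      constructor <;> omega)
    simp [genA_loop, hte, pyGetD_eq _ _ _ hs0, pyGetD_eq _ _ _ hte]
  | cons idx rest ih =>
    intro s0 ts acc hne hvalid hs0
    obtain ⟨hidx, hidx1⟩ := hvalid idx (by simp)
    obtain ⟨te, hte⟩ := pyGet?_isSome_of_inRange times idx hidx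
    obtain ⟨ts', hts'⟩ := pyGet?_isSome_of_inRange times (idx + 1) hidx1
    have := ih (idx + 1) ts' (acc ++ [(ts, te)]) hne (fun b hb => hvalid b (by simp [hb])) hts'
    simp only [genA_loop, hte, hts', List.map_cons, List.zip_cons_cons, List.cons_append]
    rw [this]
    simp [pyGetD_eq _ _ _ hs0, pyGetD_eq _ _ _ hte]

theorem genB_loop_acc (times : List Int) :
    ∀ (rb : List Int) (endv : Int) (out : List (Int × Int)),
    times ≠ [] →
    (∀ b ∈ rb, PySem.Raise.InRange times.length b ∧ PySem.Raise.InRange times.length (b + 1)) →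
    genB_loop times rb endv out = out ++ genB_loop times rb endv [] := by
  intro rb
  induction rb with
  | nil =>
    intro endv out hne _
    obtain ⟨s, hs⟩ := pyGet?_isSome_of_inRange times 0 (by
      have hpos : 0 < times.length := List.length_pos_iff.mpr hne
      constructor <;> omega)
    simp [genB_loop, hs]
  | cons b rest ih =>
    intro endv out hne hvalid
    obtain ⟨hb, hb1⟩ := hvalid b (by simp)
    obtain ⟨s, hs⟩ := pyGet?_isSome_of_inRange times (b + 1) hb1
    obtain ⟨e', he'⟩ := pyGet?_isSome_of_inRange times b hb
    have hrest : ∀ x ∈ rest, PySem.Raise.InRange times.length x ∧ PySem.Raise.InRange times.length (x + 1) :=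
      fun x hx => hvalid x (by simp [hx])
    simp only [genB_loop, hs, he']
    rw [ih e' (out ++ [(s, endv)]) hne hrest, ih e' ([] ++ [(s, endv)]) hne hrest]
    simp

theorem genB_eq_zip (times : List Int) (breaks : List Int)
    (hne : times ≠ [])
    (hvalid : ∀ b ∈ breaks, PySem.Raise.InRange times.length b ∧ PySem.Raise.InRange times.length (b + 1)) :
    ∀ (eidx endv : Int), PySem.List.pyGet? times eidx = some endv →
    (genB_loop times breaks.reverse endv []).reverse = pvZip times breaks eidx := by
  induction breaks using List.reverseRecOn with
  | nil =>
    intro eidx endv hend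
    obtain ⟨s, hs⟩ := pyGet?_isSome_of_inRange times 0 (by
      have hpos : 0 < times.length := List.length_pos_iff.mpr hne
      constructor <;> omega)
    simp [genB_loop, pvZip, hs, pyGetD_eq _ _ _ hs, pyGetD_eq _ _ _ hend]
  | append_singleton init b ih =>
    intro eidx endv hend
    obtain ⟨hb, hb1⟩ := hvalid b (by simp)
    obtain ⟨s, hs⟩ := pyGet?_isSome_of_inRange times (b + 1) hb1
    obtain ⟨e', he'⟩ := pyGet?_isSome_of_inRange times b hb
    have hvinit : ∀ x ∈ init, PySem.Raise.InRange times.length x ∧ PySem.Raise.InRange times.length (x + 1) :=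
      fun x hx => hvalid x (by simp [hx])
    have hrev : (init ++ [b]).reverse = b :: init.reverse := by simp
    rw [hrev]
    simp only [genB_loop, hs, he', List.nil_append]
    rw [genB_loop_acc times init.reverse e' [(s, endv)] hne
      (by intro x hx; exact hvinit x (by simpa using hx))]
    have hih := ih hvinit b e' he'
    simp only [List.reverse_append, List.reverse_cons, List.reverse_nil, List.nil_append]
    rw [hih]
    -- pvZip (init ++ [b]) eidx = pvZip init b ++ [(times[b+1], times[eidx])]
    unfold pvZip
    have hlen : (0 :: init.map (· + 1)).length = (init ++ [b]).length := by simp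
    have hz : (0 :: (init ++ [b]).map (· + 1)).zip ((init ++ [b]) ++ [eidx])
        = ((0 :: init.map (· + 1)).zip (init ++ [b])) ++ [(b + 1, eidx)] := by
      have : (0 :: (init ++ [b]).map (· + 1)) = (0 :: init.map (· + 1)) ++ [b + 1] := by simp
      rw [this, List.append_assoc]
      have := List.zip_append (r₁ := [b + 1]) (r₂ := [eidx]) hlen
      simpa using this
    rw [hz]
    simp [pyGetD_eq _ _ _ hs, pyGetD_eq _ _ _ hend]

-- ===== VERDICT (by name: the statement is the Claim_ definition above) =====
theorem generate_time_intervals_py_spec : Claim_equal_generate_time_intervals_py := by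
  intro times breaks _ hpre
  obtain ⟨hne, hvalid⟩ := hpre
  have hpos : 0 < times.length := List.length_pos_iff.mpr hne
  obtain ⟨t0, h0⟩ := pyGet?_isSome_of_inRange times 0 (by constructor <;> omega)
  obtain ⟨endv, hend⟩ := pyGet?_isSome_of_inRange times (-1) (by constructor <;> omega)
  unfold Spec_generate_time_intervals_py generate_time_intervals_py generate_time_intervals_py_alt
  simp only [h0, hend]
  rw [genA_eq_zip times breaks 0 t0 [] hne hvalid h0,
      genB_eq_zip times breaks hne hvalid (-1) endv hend]
  simp [pvZip]
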